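-- pv_equiv track=rewrite | github.com/arkanwolfshade/MythosMUD | server/commands/inventory_commands.py | _match_room_drop_by_name
-- ===== SOURCE A (Python) =====
-- from typing import Any, cast
--
-- def _match_room_drop_by_name(drop_list: list[dict[str, Any]], search_term: str) -> int | None:
--     """
--     Resolve a room drop index using Lovecraftian-grade fuzzy matching heuristics.
--
--     Human collaborators: we prefer exact identifiers, then courteous prefix matches, before falling back
--     to substring containment—echoing the cataloguing rites described in Dr. Wilmarth's Restricted Archives.
--     Agentic aides: return a zero-based index for the best candidate or None if no alignment is found.
--     """
--
--     normalized = search_term.strip().lower()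
--     if not normalized:
--         return None
--
--     def _extract(stack: dict[str, Any], key: str) -> str | None:
--         value = stack.get(key)
--         if isinstance(value, str):
--             stripped = value.strip()
--             return stripped if stripped else None
--         return None
--
--     candidates: list[tuple[int, str | None, str | None, str | None]] = []
--     for idx, stack in enumerate(drop_list):
--         item_name = _extract(stack, "item_name")
--         item_id = _extract(stack, "item_id")
--         prototype_id = _extract(stack, "prototype_id")
--         candidates.append((idx, item_name, item_id, prototype_id))
--
--     for idx, item_name, item_id, prototype_id in candidates:
--         for candidate in (item_name, item_id, prototype_id):
--             if candidate and candidate.lower() == normalized: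
--                 return idx
--
--     for idx, item_name, _item_id, _prototype_id in candidates:
--         if item_name and item_name.lower().startswith(normalized):
--             return idx
--
--     for idx, _item_name, item_id, prototype_id in candidates:
--         for candidate in (item_id, prototype_id):
--             if candidate and candidate.lower().startswith(normalized):
--                 return idx
--
--     for idx, item_name, item_id, prototype_id in candidates:
--         for candidate in (item_name, item_id, prototype_id):
--             if candidate and normalized in candidate.lower():
--                 return idx
--
--     return None
-- ===== SOURCE B (Python) =====
-- def _match_room_drop_by_name(drop_list, search_term):
--     """Single-pass argmin over (tier, index) instead of four sequential scans."""
--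
--     normalized = search_term.strip().lower()
--     if not normalized:
--         return None
--
--     def _extract(stack, key):
--         value = stack.get(key)
--         if isinstance(value, str):
--             stripped = value.strip()
--             return stripped if stripped else None
--         return None
--
--     best = None  # (tier, idx); earlier index wins ties because we only replace on strictly smaller tier
--     for idx, stack in enumerate(drop_list):
--         name = _extract(stack, "item_name")
--         iid = _extract(stack, "item_id")
--         pid = _extract(stack, "prototype_id")
--         name = name.lower() if name else None
--         iid = iid.lower() if iid else None
--         pid = pid.lower() if pid else None
--         if normalized in (name, iid, pid):
--             tier = 1
--         elif name is not None and name.startswith(normalized):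
--             tier = 2
--         elif (iid is not None and iid.startswith(normalized)) or (
--             pid is not None and pid.startswith(normalized)
--         ):
--             tier = 3
--         elif any(f is not None and normalized in f for f in (name, iid, pid)):
--             tier = 4
--         else:
--             tier = None
--         if tier is not None and (best is None or tier < best[0]):
--             best = (tier, idx)
--     return best[1] if best is not None else None
-- ===== Notes on version B (the rewrite author's own statement) =====
-- stated objective: alternative
-- what changed: Replaces A's four sequential full scans (exact, name-prefix, id-prefix, substring) with a single pass that assigns each entry its best matching tier and keeps the argmin over (tier, index).
import Mathlib
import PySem

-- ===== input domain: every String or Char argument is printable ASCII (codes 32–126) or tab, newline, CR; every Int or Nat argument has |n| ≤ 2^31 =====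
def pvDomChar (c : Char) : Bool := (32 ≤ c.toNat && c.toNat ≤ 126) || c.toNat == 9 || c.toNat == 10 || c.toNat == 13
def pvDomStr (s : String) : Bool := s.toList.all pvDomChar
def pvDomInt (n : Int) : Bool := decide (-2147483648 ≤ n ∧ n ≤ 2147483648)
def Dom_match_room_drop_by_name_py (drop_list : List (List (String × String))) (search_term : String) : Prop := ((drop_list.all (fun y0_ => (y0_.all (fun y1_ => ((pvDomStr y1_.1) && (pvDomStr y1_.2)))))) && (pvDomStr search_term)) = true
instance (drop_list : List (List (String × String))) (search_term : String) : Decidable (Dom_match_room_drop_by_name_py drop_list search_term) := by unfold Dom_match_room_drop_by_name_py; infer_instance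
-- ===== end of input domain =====

-- B replaces A's four sequential scans by a single pass keeping the argmin over (tier, index); same results, a different decomposition.

-- ===== PORT A =====
-- shared helper: Python's inner _extract (dict.get + strip, empty → None; values are always str here)
def pvExtract (stack : List (String × String)) (key : String) : Option String :=
  match PySem.Dict.get? (PySem.Dict.mk stack) key with
  | none => none
  | some v =>
    let stripped := PySem.Str.strip v
    if stripped = "" then none else some stripped

-- a candidate tuple (idx, item_name, item_id, prototype_id)
abbrev PvCand := Int × Option String × Option String × Option String

-- 'candidate and candidate.lower() == normalized' (candidates are None or nonempty)
def pvFieldEq (n : String) : Option String → Bool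
  | none => false
  | some s => PySem.Str.lower s == n

def pvFieldPre (n : String) : Option String → Bool
  | none => false
  | some s => PySem.Str.startswith (PySem.Str.lower s) n

def pvFieldSub (n : String) : Option String → Bool
  | none => false
  | some s => PySem.Str.isIn n (PySem.Str.lower s)

-- the four 'for … return idx' loops of A (the inner tuple loop is the disjunction of its three checks)
def pvPass1 (n : String) : List PvCand → Option Int
  | [] => none
  | c :: rest =>
    if pvFieldEq n c.2.1 || pvFieldEq n c.2.2.1 || pvFieldEq n c.2.2.2 then some c.1
    else pvPass1 n rest

def pvPass2 (n : String) : List PvCand → Option Int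
  | [] => none
  | c :: rest => if pvFieldPre n c.2.1 then some c.1 else pvPass2 n rest

def pvPass3 (n : String) : List PvCand → Option Int
  | [] => none
  | c :: rest =>
    if pvFieldPre n c.2.2.1 || pvFieldPre n c.2.2.2 then some c.1 else pvPass3 n rest

def pvPass4 (n : String) : List PvCand → Option Int
  | [] => none
  | c :: rest =>
    if pvFieldSub n c.2.1 || pvFieldSub n c.2.2.1 || pvFieldSub n c.2.2.2 then some c.1
    else pvPass4 n rest

def match_room_drop_by_name_py (drop_list : List (List (String × String))) (search_term : String) : Option Int :=
  let normalized := PySem.Str.lower (PySem.Str.strip search_term)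
  if normalized = "" then none
  else
    let candidates : List PvCand :=
      (PySem.List.enumerate drop_list 0).foldl
        (fun acc p => acc ++ [(p.1, pvExtract p.2 "item_name", pvExtract p.2 "item_id", pvExtract p.2 "prototype_id")]) []
    match pvPass1 normalized candidates with
    | some i => some i
    | none =>
      match pvPass2 normalized candidates with
      | some i => some i
      | none =>
        match pvPass3 normalized candidates with
        | some i => some i
        | none =>
          match pvPass4 normalized candidates with
          | some i => some i
          | none => none

-- ===== PORT B =====
-- 'f.lower() if f else None'
def pvLowOpt : Option String → Option String
  | none => none
  | some s => some (PySem.Str.lower s)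

-- the tier if-chain of Source B applied to the lowered fields
def pvTier (n : String) (nm iid pid : Option String) : Option Int :=
  if nm == some n || iid == some n || pid == some n then some 1
  else if (match nm with | some s => PySem.Str.startswith s n | none => false) then some 2
  else if ((match iid with | some s => PySem.Str.startswith s n | none => false) ||
           (match pid with | some s => PySem.Str.startswith s n | none => false)) then some 3
  else if ((match nm with | some s => PySem.Str.isIn n s | none => false) ||
           (match iid with | some s => PySem.Str.isIn n s | none => false) ||
           (match pid with | some s => PySem.Str.isIn n s | none => false)) then some 4
  else none

-- one loop iteration of Source B: update best with this entry's (tier, idx)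
def pvUpd (n : String) (best : Option (Int × Int)) (p : Int × List (String × String)) : Option (Int × Int) :=
  let nm := pvLowOpt (pvExtract p.2 "item_name")
  let iid := pvLowOpt (pvExtract p.2 "item_id")
  let pid := pvLowOpt (pvExtract p.2 "prototype_id")
  match pvTier n nm iid pid with
  | none => best
  | some t =>
    match best with
    | none => some (t, p.1)
    | some b => if t < b.1 then some (t, p.1) else best

def match_room_drop_by_name_py_alt (drop_list : List (List (String × String))) (search_term : String) : Option Int :=
  let normalized := PySem.Str.lower (PySem.Str.strip search_term)
  if normalized = "" then none
  else ((PySem.List.enumerate drop_list 0).foldl (pvUpd normalized) none).map (·.2)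

-- ===== PRECONDITION & SPEC =====
def Spec_match_room_drop_by_name_py (drop_list : List (List (String × String))) (search_term : String) (out : Option Int) : Prop := out = match_room_drop_by_name_py_alt drop_list search_term
instance (drop_list : List (List (String × String))) (search_term : String) (out : Option Int) : Decidable (Spec_match_room_drop_by_name_py drop_list search_term out) := by unfold Spec_match_room_drop_by_name_py; infer_instance

-- ===== CLAIM (what is proved, stated in full; the proofs are below) =====
def Claim_equal_match_room_drop_by_name_py : Prop := ∀ (drop_list : List (List (String × String))) (search_term : String), Dom_match_room_drop_by_name_py drop_list search_term → Spec_match_room_drop_by_name_py drop_list search_term (match_room_drop_by_name_py drop_list search_term)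

-- ===== LEMMAS AND PROOFS =====
-- left-biased minimum on (tier, idx) by tier, none = +∞
def pvMinOpt : Option (Int × Int) → Option (Int × Int) → Option (Int × Int)
  | b, none => b
  | none, some a => some a
  | some b, some a => if a.1 < b.1 then some a else some b

-- the (tier, idx) pair A would select from cs via its four ordered passes
def pvAmin (n : String) (cs : List PvCand) : Option (Int × Int) :=
  match pvPass1 n cs with
  | some i => some (1, i)
  | none =>
    match pvPass2 n cs with
    | some i => some (2, i)
    | none =>
      match pvPass3 n cs with
      | some i => some (3, i)
      | none =>
        match pvPass4 n cs with
        | some i => some (4, i)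
        | none => none

def pvCandOf (p : Int × List (String × String)) : PvCand :=
  (p.1, pvExtract p.2 "item_name", pvExtract p.2 "item_id", pvExtract p.2 "prototype_id")

def pvPairOf (n : String) (c : PvCand) : Option (Int × Int) :=
  (pvTier n (pvLowOpt c.2.1) (pvLowOpt c.2.2.1) (pvLowOpt c.2.2.2)).map (fun t => (t, c.1))

lemma pvFieldEq_eq (n : String) (f : Option String) :
    pvFieldEq n f = (pvLowOpt f == some n) := by
  cases f <;> simp [pvFieldEq, pvLowOpt]

lemma pvFieldPre_eq (n : String) (f : Option String) :
    pvFieldPre n f = (match pvLowOpt f with | some s => PySem.Str.startswith s n | none => false) := by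
  cases f <;> simp [pvFieldPre, pvLowOpt]

lemma pvFieldSub_eq (n : String) (f : Option String) :
    pvFieldSub n f = (match pvLowOpt f with | some s => PySem.Str.isIn n s | none => false) := by
  cases f <;> simp [pvFieldSub, pvLowOpt]

lemma pvMinOpt_none_left (a : Option (Int × Int)) : pvMinOpt none a = a := by
  cases a <;> rfl

lemma pvMinOpt_assoc (x y z : Option (Int × Int)) :
    pvMinOpt (pvMinOpt x y) z = pvMinOpt x (pvMinOpt y z) := by
  rcases x with _ | ⟨x1, x2⟩ <;> rcases y with _ | ⟨y1, y2⟩ <;> rcases z with _ | ⟨z1, z2⟩ <;>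
    simp only [pvMinOpt] <;> split_ifs <;>
    simp only [] <;> split_ifs <;> first | rfl | (exfalso; omega)

lemma pvAmin_cons (n : String) (c : PvCand) (rest : List PvCand) :
    pvAmin n (c :: rest) = pvMinOpt (pvPairOf n c) (pvAmin n rest) := by
  obtain ⟨i, nm, iid, pid⟩ := c
  simp only [pvAmin, pvPass1, pvPass2, pvPass3, pvPass4, pvPairOf, pvTier,
    pvFieldEq_eq, pvFieldPre_eq, pvFieldSub_eq]
  by_cases h1 : (pvLowOpt nm == some n || pvLowOpt iid == some n || pvLowOpt pid == some n) = true <;>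
  by_cases h2 : (match pvLowOpt nm with | some s => PySem.Str.startswith s n | none => false) = true <;>
  by_cases h3 : ((match pvLowOpt iid with | some s => PySem.Str.startswith s n | none => false) ||
      (match pvLowOpt pid with | some s => PySem.Str.startswith s n | none => false)) = true <;>
  by_cases h4 : ((match pvLowOpt nm with | some s => PySem.Str.isIn n s | none => false) ||
      (match pvLowOpt iid with | some s => PySem.Str.isIn n s | none => false) ||
      (match pvLowOpt pid with | some s => PySem.Str.isIn n s | none => false)) = true <;>
  simp only [h1, h2, h3, h4, if_true, if_false, Bool.false_eq_true] <;>
  cases hp1 : pvPass1 n rest <;> cases hp2 : pvPass2 n rest <;>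
  cases hp3 : pvPass3 n rest <;> cases hp4 : pvPass4 n rest <;>
  simp_all [pvMinOpt]
  
lemma pvUpd_eq (n : String) (best : Option (Int × Int)) (p : Int × List (String × String)) :
    pvUpd n best p = pvMinOpt best (pvPairOf n (pvCandOf p)) := by
  simp only [pvUpd, pvPairOf, pvCandOf]
  cases pvTier n (pvLowOpt (pvExtract p.2 "item_name")) (pvLowOpt (pvExtract p.2 "item_id"))
      (pvLowOpt (pvExtract p.2 "prototype_id")) <;>
    cases best <;> simp [pvMinOpt]

lemma pvFoldl_eq (n : String) (l : List (Int × List (String × String)))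
    (best : Option (Int × Int)) :
    l.foldl (pvUpd n) best = pvMinOpt best (pvAmin n (l.map pvCandOf)) := by
  induction l generalizing best with
  | nil => simp [pvAmin, pvPass1, pvPass2, pvPass3, pvPass4, pvMinOpt]
  | cons p l ih =>
    simp only [List.foldl_cons, List.map_cons, ih, pvUpd_eq, pvAmin_cons, pvMinOpt_assoc]

lemma pvCandidates_eq (dl : List (List (String × String))) :
    (PySem.List.enumerate dl 0).foldl
        (fun acc p => acc ++ [(p.1, pvExtract p.2 "item_name", pvExtract p.2 "item_id", pvExtract p.2 "prototype_id")]) []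
      = (PySem.List.enumerate dl 0).map pvCandOf := by
  rw [PySem.List.foldl_append_singleton_eq_map]
  rfl

lemma pvChain_eq (n : String) (cs : List PvCand) :
    (match pvPass1 n cs with
      | some i => some i
      | none => match pvPass2 n cs with
        | some i => some i
        | none => match pvPass3 n cs with
          | some i => some i
          | none => match pvPass4 n cs with
            | some i => some i
            | none => (none : Option Int))
      = (pvAmin n cs).map (·.2) := by
  simp only [pvAmin]
  cases pvPass1 n cs <;> cases pvPass2 n cs <;> cases pvPass3 n cs <;> cases pvPass4 n cs <;> rfl

-- ===== VERDICT (by name: the statement is the Claim_ definition above) =====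
theorem match_room_drop_by_name_py_spec : Claim_equal_match_room_drop_by_name_py := by
  intro dl s _
  unfold Spec_match_room_drop_by_name_py
  unfold match_room_drop_by_name_py match_room_drop_by_name_py_alt
  by_cases h : PySem.Str.lower (PySem.Str.strip s) = ""
  · simp [h]
  · simp only [h, if_false]
    rw [pvCandidates_eq, pvChain_eq, pvFoldl_eq, pvMinOpt_none_left]
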